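-- pv_equiv track=rewrite | github.com/maneesh070/practice | 7_triangle_shinking_downward.py | triDownwards
-- ===== SOURCE A (Python) =====
-- def triDownwards(a):
--     setTri = []
--     n = len(a)
--     for i in range(0, n):
--         # s = '*'*i + a[i:n]
--         s = ''
--         for _ in range(i):
--             s += '*'
--         s += a[i:n]
--         setTri.append(s)
--     return setTri
-- ===== SOURCE B (Python) =====
-- def triDownwards(a):
--     res = []
--     s = a
--     for i in range(len(a)):
--         res.append(s)
--         s = s[:i] + '*' + s[i + 1:]
--     return res
-- ===== Notes on version B (the rewrite author's own statement) =====
-- stated objective: alternative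
-- what changed: Each row is derived incrementally from the previous one by overwriting its i-th character with a star in a single running string, instead of rebuilding every row from scratch with an inner star-appending loop.
import Mathlib
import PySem

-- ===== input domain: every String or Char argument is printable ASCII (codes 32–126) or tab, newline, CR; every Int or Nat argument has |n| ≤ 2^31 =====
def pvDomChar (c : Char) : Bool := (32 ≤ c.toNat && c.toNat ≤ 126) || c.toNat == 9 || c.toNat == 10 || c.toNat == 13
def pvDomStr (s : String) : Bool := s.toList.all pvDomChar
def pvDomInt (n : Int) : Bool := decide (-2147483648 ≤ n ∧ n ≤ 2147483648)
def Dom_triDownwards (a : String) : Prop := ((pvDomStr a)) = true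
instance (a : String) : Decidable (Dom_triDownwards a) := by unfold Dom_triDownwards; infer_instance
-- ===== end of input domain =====

-- B builds each row from the previous one by starring one character (running accumulator),
-- instead of rebuilding every row with an inner star-appending loop.

-- ===== PORT A =====
def triDownwards (a : String) : List String :=
  (PySem.List.pyRange 0 (PySem.Str.len a) 1).foldl (fun (setTri : List String) (i : Int) =>
    setTri ++ [String.mk
      (((PySem.List.pyRange 0 i 1).foldl (fun s _ => s ++ ['*']) [])
        ++ PySem.List.slice a.toList (some i) (some (PySem.Str.len a)))]) []

-- ===== PORT B =====
def triDownwards_alt (a : String) : List String :=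
  (((PySem.List.pyRange 0 (PySem.Str.len a) 1).foldl
    (fun (st : List String × List Char) (i : Int) =>
      (st.1 ++ [String.mk st.2],
       PySem.List.slice st.2 none (some i) ++ ['*']
         ++ PySem.List.slice st.2 (some (i + 1)) none))
    ([], a.toList))).1

-- ===== PRECONDITION & SPEC =====
def Spec_triDownwards (a : String) (out : List String) : Prop := out = triDownwards_alt a
instance (a : String) (out : List String) : Decidable (Spec_triDownwards a out) := by unfold Spec_triDownwards; infer_instance

-- ===== CLAIM (what is proved, stated in full; the proofs are below) =====
def Claim_equal_triDownwards : Prop := ∀ (a : String), Dom_triDownwards a → Spec_triDownwards a (triDownwards a)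

-- ===== LEMMAS AND PROOFS =====

-- the closed form of row i
def pvRow (l : List Char) (i : Nat) : String := String.mk (List.replicate i '*' ++ l.drop i)

theorem pv_foldl_append_map {α β : Type} (f : α → β) :
    ∀ (xs : List α) (acc : List β),
      xs.foldl (fun acc x => acc ++ [f x]) acc = acc ++ xs.map f := by
  intro xs
  induction xs with
  | nil => simp
  | cons x xs ih => intro acc; simp [List.foldl, ih]

theorem pv_foldl_star {α : Type} (c : Char) :
    ∀ (xs : List α) (s : List Char),
      xs.foldl (fun s _ => s ++ [c]) s = s ++ List.replicate xs.length c := by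
  intro xs
  induction xs with
  | nil => simp
  | cons x xs ih =>
    intro s
    simp [List.foldl, ih, List.replicate_succ]

theorem pv_A_closed (a : String) :
    triDownwards a = (List.range a.toList.length).map (pvRow a.toList) := by
  unfold triDownwards
  rw [PySem.Str.len_eq, PySem.List.pyRange_one]
  simp only [sub_zero, Int.toNat_natCast, List.foldl_map]
  rw [pv_foldl_append_map (f := fun (k : Nat) =>
    String.mk (((PySem.List.pyRange 0 ((0:Int) + k) 1).foldl (fun s _ => s ++ ['*']) [])
      ++ PySem.List.slice a.toList (some ((0:Int) + k)) (some (a.toList.length : Int))))]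
  simp only [List.nil_append]
  apply List.map_congr_left
  intro k hk
  rw [List.mem_range] at hk
  have h0 : (0:Int) + (k:Int) = (k:Int) := by ring
  rw [h0]
  rw [pv_foldl_star]
  rw [PySem.List.slice_natCast]
  rw [PySem.List.length_pyRange_one]
  have hlen : ((a.toList.drop k).take (a.toList.length - k)) = a.toList.drop k := by
    apply List.take_of_length_le
    simp
  rw [hlen]
  simp [pvRow]


theorem pv_B_loop (l : List Char) :
    ∀ (m k : Nat) (acc : List String), k + m = l.length →
      ((PySem.List.pyRange (k : Int) (l.length : Int) 1).foldl
        (fun (st : List String × List Char) (i : Int) =>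
          (st.1 ++ [String.mk st.2],
           PySem.List.slice st.2 none (some i) ++ ['*']
             ++ PySem.List.slice st.2 (some (i + 1)) none))
        (acc, List.replicate k '*' ++ l.drop k)).1
      = acc ++ (List.range' k m).map (pvRow l) := by
  intro m
  induction m with
  | zero =>
    intro k acc hk
    have : (k : Int) = (l.length : Int) := by omega
    rw [this, PySem.List.pyRange_one_eq_nil (le_refl _)]
    simp
  | succ m ih =>
    intro k acc hk
    have hlt : (k : Int) < (l.length : Int) := by exact_mod_cast (by omega : k < l.length)
    rw [PySem.List.pyRange_one_cons hlt]
    simp only [List.foldl_cons]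
    have hs : PySem.List.slice (List.replicate k '*' ++ l.drop k) none (some (k : Int))
        = List.replicate k '*' := by
      rw [PySem.List.slice_to_natCast]
      rw [List.take_append_of_le_length (by simp)]
      simp
    have hs2 : PySem.List.slice (List.replicate k '*' ++ l.drop k) (some ((k : Int) + 1)) none
        = l.drop (k + 1) := by
      have : (k : Int) + 1 = ((k + 1 : Nat) : Int) := by push_cast; ring
      rw [this, PySem.List.slice_from_natCast]
      rw [show k + 1 = (List.replicate k '*').length + 1 by simp, List.drop_append]
      simp [List.drop_drop]
    rw [hs, hs2]
    have hrep : List.replicate k '*' ++ ['*'] ++ l.drop (k + 1)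
        = List.replicate (k + 1) '*' ++ l.drop (k + 1) := by
      rw [← List.replicate_succ' (n := k)]
    have hcast : (k : Int) + 1 = ((k + 1 : Nat) : Int) := by push_cast; ring
    rw [hrep, hcast, ih (k + 1) (acc ++ [String.mk (List.replicate k '*' ++ l.drop k)]) (by omega)]
    rw [List.range'_succ]
    simp [pvRow]

theorem pv_B_closed (a : String) :
    triDownwards_alt a = (List.range a.toList.length).map (pvRow a.toList) := by
  unfold triDownwards_alt
  rw [PySem.Str.len_eq]
  have h := pv_B_loop a.toList a.toList.length 0 [] (by omega)
  simp only [Nat.cast_zero, List.replicate_zero, List.drop_zero, List.nil_append] at h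
  rw [h]
  simp [List.range_eq_range']

-- ===== VERDICT (by name: the statement is the Claim_ definition above) =====
theorem triDownwards_spec : Claim_equal_triDownwards := by
  intro a _
  unfold Spec_triDownwards
  rw [pv_A_closed, pv_B_closed]
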